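-- pv_equiv track=rewrite | github.com/inner-LMNt/advent-of-code | December 2024/12/garden2.py | solve
-- ===== SOURCE A (Python) =====
-- def solve(garden):
--     visited = set()
--
--     def valid(x, y):
--         return 0 <= x < len(garden) and 0 <= y < len(garden[0])
--
--     def dfs(x, y, p):
--         result = []
--         stack = [(x, y)]
--         while stack:
--             x, y = stack.pop()
--             result.append((x, y))
--             for dx, dy in [(1, 0), (-1, 0), (0, 1), (0, -1)]:
--                 nx, ny = x + dx, y + dy
--                 if valid(nx, ny) and (nx, ny) not in visited and garden[nx][ny] == p:
--                     visited.add((nx, ny))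
--                     stack.append((nx, ny))
--         return result
--
--     def get_perimeter(region):
--         result = 0
--         for x, y in region:
--             for dx, dy in [(1, 0), (-1, 0), (0, 1), (0, -1)]:
--                 nx, ny = x + dx, y + dy
--                 if not valid(nx, ny) or garden[nx][ny] != garden[x][y]:
--                     result += 1
--         return result
--
--
--     def shared_sides(region):
--         result = 0
--         for x, y in region:
--             if (x + 1, y) in region: # check right adjacent
--                 for y2 in [y - 1, y + 1]: # top and bottom
--                     if (x, y2) not in region and (x + 1, y2) not in region:
--                         result += 1
--             if (x, y + 1) in region: # check bottom adjacent
--                 for x2 in [x - 1, x + 1]: # left and right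
--                     if (x2, y) not in region and (x2, y + 1) not in region:
--                         result += 1
--         return result
--
--     cost = 0
--     for i in range(len(garden)):
--         for j in range(len(garden[0])):
--             if (i, j) not in visited:
--                 visited.add((i, j))
--                 plants = dfs(i, j, garden[i][j])
--                 area = len(plants)
--                 perimeter = get_perimeter(plants)
--                 cost += area * (perimeter - shared_sides(plants))
--
--     return cost
-- ===== SOURCE B (Python) =====
-- def solve(garden):
--     h = len(garden)
--     w = len(garden[0]) if garden else 0
--
--     def same(p, x, y):
--         return 0 <= x < h and 0 <= y < w and garden[x][y] == p
--
--     def flood(i, j):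
--         plant = garden[i][j]
--         region = {(i, j)}
--         frontier = [(i, j)]
--         while frontier:
--             x, y = frontier.pop()
--             for nx, ny in ((x - 1, y), (x + 1, y), (x, y - 1), (x, y + 1)):
--                 if (nx, ny) not in region and same(plant, nx, ny):
--                     region.add((nx, ny))
--                     frontier.append((nx, ny))
--         return region
--
--     def cell_corners(x, y):
--         # corners of the region boundary at cell (x,y); purely local: an orthogonal
--         # same-plant neighbour is always in the same region, and so is the diagonal
--         # when both orthogonals are.
--         p = garden[x][y]
--         k = 0
--         for dx in (-1, 1):
--             for dy in (-1, 1):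
--                 if not same(p, x + dx, y) and not same(p, x, y + dy):
--                     k += 1
--                 elif same(p, x + dx, y) and same(p, x, y + dy) and not same(p, x + dx, y + dy):
--                     k += 1
--         return k
--
--     seen = set()
--     total = 0
--     for i in range(h):
--         for j in range(w):
--             if (i, j) not in seen:
--                 region = flood(i, j)
--                 seen |= region
--                 total += len(region) * sum(cell_corners(x, y) for x, y in region)
--     return total
-- ===== Notes on version B (the rewrite author's own statement) =====
-- stated objective: faster
-- what changed: Replaces A's two region passes get_perimeter + shared_sides (perimeter minus shared edge-segments, with O(area) Python-list membership per test) by a purely LOCAL corner count read off the garden's 3x3 plant pattern around each cell (sides = corners; an orthogonal same-plant neighbour is always in the same region, and so is the diagonal when both orthogonals are), and reworks the flood fill into a self-contained per-region routine with the region set as its own visited set, merged into the global seen set afterwards.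
import Mathlib
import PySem

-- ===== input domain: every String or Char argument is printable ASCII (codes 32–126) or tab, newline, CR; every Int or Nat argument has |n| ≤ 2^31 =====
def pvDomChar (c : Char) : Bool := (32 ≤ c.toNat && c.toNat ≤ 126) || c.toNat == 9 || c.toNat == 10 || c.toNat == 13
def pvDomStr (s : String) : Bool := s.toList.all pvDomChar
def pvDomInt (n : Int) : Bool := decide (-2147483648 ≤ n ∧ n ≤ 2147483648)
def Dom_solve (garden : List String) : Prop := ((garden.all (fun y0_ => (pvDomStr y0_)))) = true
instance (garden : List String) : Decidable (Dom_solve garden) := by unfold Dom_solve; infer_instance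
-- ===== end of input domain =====

-- B replaces A's two region passes (get_perimeter + shared_sides) by a purely local corner count
-- read off the garden around each cell (sides = corners), and reworks the flood fill into a
-- self-contained per-region routine; the claim is about return values, neither program mutates
-- its argument.

-- ===== PORT A =====
abbrev PCell := Int × Int
def pvH (g : List String) : Int := PySem.List.len g
def pvW (g : List String) : Int := PySem.Str.len (PySem.List.pyGetD g 0 "")
def pvPlant (g : List String) (x y : Int) : Char :=
  PySem.List.pyGetD (PySem.List.pyGetD g x "").toList y ' '
def pvValid (g : List String) (x y : Int) : Bool :=
  (decide (0 ≤ x) && decide (x < pvH g)) && (decide (0 ≤ y) && decide (y < pvW g))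
def pvDirs : List PCell := [(1, 0), (-1, 0), (0, 1), (0, -1)]
def pvNbr (c d : PCell) : PCell := (c.1 + d.1, c.2 + d.2)
def pvStep (g : List String) (p : Char) (c : PCell)
    (vs : PySem.Set PCell × List PCell) (d : PCell) : PySem.Set PCell × List PCell :=
  let n : PCell := pvNbr c d
  if pvValid g n.1 n.2 && !(PySem.Set.contains vs.1 n) && (pvPlant g n.1 n.2 == p)
  then (PySem.Set.add vs.1 n, n :: vs.2)
  else vs
def pvGridList (g : List String) : List PCell :=
  (PySem.List.pyRange 0 (pvH g) 1).flatMap (fun i =>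
    (PySem.List.pyRange 0 (pvW g) 1).map (fun j => (i, j)))
def pvGridFin (g : List String) : Finset PCell := (pvGridList g).toFinset
def pvMu (g : List String) (v : List PCell) (s : List PCell) : Nat :=
  5 * ((pvGridFin g).filter (fun c => c ∉ v)).card + s.length

-- the while-stack loop; fuel is an upper bound on the number of iterations (pvMu) so the
-- 0-fuel branch is never taken on the calls the ports make
def pvDfsA (g : List String) (p : Char) :
    Nat → PySem.Set PCell → List PCell → List PCell → List PCell × PySem.Set PCell
  | 0, visited, _, result => (result, visited)
  | _ + 1, visited, [], result => (result, visited)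
  | fuel + 1, visited, c :: stack, result =>
      let vs := pvDirs.foldl (pvStep g p c) (visited, stack)
      pvDfsA g p fuel vs.1 vs.2 (result ++ [c])

def pvPerimA (g : List String) (region : List PCell) : Int :=
  region.foldl (fun res c =>
    pvDirs.foldl (fun res d =>
      if ¬ (pvValid g (c.1 + d.1) (c.2 + d.2) = true)
          ∨ pvPlant g (c.1 + d.1) (c.2 + d.2) ≠ pvPlant g c.1 c.2
      then res + 1 else res) res) 0

def pvSharedA (region : List PCell) : Int :=
  region.foldl (fun res c =>
    let res1 := if (c.1 + 1, c.2) ∈ region then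
        [c.2 - 1, c.2 + 1].foldl (fun res y2 =>
          if (c.1, y2) ∉ region ∧ (c.1 + 1, y2) ∉ region then res + 1 else res) res
      else res
    if (c.1, c.2 + 1) ∈ region then
        [c.1 - 1, c.1 + 1].foldl (fun res x2 =>
          if (x2, c.2) ∉ region ∧ (x2, c.2 + 1) ∉ region then res + 1 else res) res1
      else res1) 0

def solve (garden : List String) : Int :=
  ((PySem.List.pyRange 0 (pvH garden) 1).foldl (fun st i =>
    (PySem.List.pyRange 0 (pvW garden) 1).foldl (fun st j =>
      if ((i, j) : PCell) ∈ st.1 then st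
      else
        let visited := PySem.Set.add st.1 (i, j)
        let pr := pvDfsA garden (pvPlant garden i j) (pvMu garden visited [(i, j)]) visited [(i, j)] []
        let area : Int := PySem.List.len pr.1
        (pr.2, st.2 + area * (pvPerimA garden pr.1 - pvSharedA pr.1))) st)
    ((PySem.Set.empty : PySem.Set PCell), (0 : Int))).2

-- ===== PORT B =====
-- B's `same(p, x, y)`: in bounds and carrying plant p
def pvSame (g : List String) (p : Char) (x y : Int) : Bool :=
  (decide (0 ≤ x) && decide (x < pvH g)) && (decide (0 ≤ y) && decide (y < pvW g))
    && (pvPlant g x y == p)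

-- B's neighbour tuple ((x-1,y),(x+1,y),(x,y-1),(x,y+1))
def pvNbrsB (c : PCell) : List PCell :=
  [(c.1 - 1, c.2), (c.1 + 1, c.2), (c.1, c.2 - 1), (c.1, c.2 + 1)]

def pvFloodStep (g : List String) (p : Char)
    (st : PySem.Set PCell × List PCell) (n : PCell) : PySem.Set PCell × List PCell :=
  if !(PySem.Set.contains st.1 n) && pvSame g p n.1 n.2
  then (PySem.Set.add st.1 n, n :: st.2)
  else st

-- B's while-frontier loop, the region set serving as its own visited set
def pvFlood (g : List String) (p : Char) :
    Nat → PySem.Set PCell → List PCell → PySem.Set PCell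
  | 0, region, _ => region
  | _ + 1, region, [] => region
  | fuel + 1, region, c :: frontier =>
      let st := (pvNbrsB c).foldl (pvFloodStep g p) (region, frontier)
      pvFlood g p fuel st.1 st.2

-- B's cell_corners: purely local on the garden
def pvCorners (g : List String) (x y : Int) : Int :=
  let p := pvPlant g x y
  [(-1 : Int), 1].foldl (fun k dx =>
    [(-1 : Int), 1].foldl (fun k dy =>
      if !(pvSame g p (x + dx) y) && !(pvSame g p x (y + dy)) then k + 1
      else if pvSame g p (x + dx) y && pvSame g p x (y + dy)
          && !(pvSame g p (x + dx) (y + dy)) then k + 1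
      else k) k) 0

def solve_alt (garden : List String) : Int :=
  ((PySem.List.pyRange 0 (pvH garden) 1).foldl (fun st i =>
    (PySem.List.pyRange 0 (pvW garden) 1).foldl (fun st j =>
      if ((i, j) : PCell) ∈ st.1 then st
      else
        let region := pvFlood garden (pvPlant garden i j)
          (pvMu garden (PySem.Set.add PySem.Set.empty ((i, j) : PCell)) [((i, j) : PCell)])
          (PySem.Set.add PySem.Set.empty ((i, j) : PCell)) [((i, j) : PCell)]
        (PySem.Set.union st.1 region,
         st.2 + PySem.Set.len region
            * (region.foldl (fun s c => s + pvCorners garden c.1 c.2) 0))) st)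
    ((PySem.Set.empty : PySem.Set PCell), (0 : Int))).2

-- ===== PRECONDITION & SPEC =====
-- Pre_solve holds exactly where Python's solve returns: grids whose every row is at least as
-- long as row 0 (on a shorter row both programs raise IndexError at the first inaccessible
-- cell garden[i][j] with j < len(garden[0])).
def Pre_solve (garden : List String) : Prop :=
  ∀ s ∈ garden, (PySem.List.pyGetD garden 0 "").length ≤ s.length
instance (garden : List String) : Decidable (Pre_solve garden) := by
  unfold Pre_solve; infer_instance

def pvWitness_solve : List String := ["AAB", "ABB"]

def Spec_solve (garden : List String) (out : Int) : Prop := out = solve_alt garden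
instance (garden : List String) (out : Int) : Decidable (Spec_solve garden out) := by
  unfold Spec_solve; infer_instance

-- ===== CLAIM (what is proved, stated in full; the proofs are below) =====
def Claim_equal_solve : Prop :=
  ∀ (garden : List String), Dom_solve garden → Pre_solve garden → Spec_solve garden (solve garden)


-- ===== LEMMAS AND PROOFS =====

-- ---- grid / measure facts ----
theorem mem_pvGridFin {g : List String} {c : PCell} :
    c ∈ pvGridFin g ↔ 0 ≤ c.1 ∧ c.1 < pvH g ∧ 0 ≤ c.2 ∧ c.2 < pvW g := by
  obtain ⟨x, y⟩ := c
  simp only [pvGridFin, List.mem_toFinset, pvGridList, List.mem_flatMap, List.mem_map,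
    PySem.List.mem_pyRange_one, Prod.mk.injEq]
  constructor
  · rintro ⟨a, ha, b, hb, hx, hy⟩; omega
  · rintro ⟨hx0, hxh, hy0, hyw⟩
    exact ⟨x, ⟨hx0, hxh⟩, y, ⟨hy0, hyw⟩, rfl, rfl⟩

theorem pvValid_mem_grid {g : List String} {x y : Int} (h : pvValid g x y = true) :
    ((x, y) : PCell) ∈ pvGridFin g := by
  simp only [pvValid, Bool.and_eq_true, decide_eq_true_eq] at h
  rw [mem_pvGridFin]; exact ⟨h.1.1, h.1.2, h.2.1, h.2.2⟩

theorem pvUnseen_drop {g : List String} {v : List PCell} {n : PCell}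
    (hg : n ∈ pvGridFin g) (hn : n ∉ v) :
    ((pvGridFin g).filter (fun c => c ∉ PySem.Set.add v n)).card + 1
      = ((pvGridFin g).filter (fun c => c ∉ v)).card := by
  have hset : (pvGridFin g).filter (fun c => c ∉ PySem.Set.add v n)
      = ((pvGridFin g).filter (fun c => c ∉ v)).erase n := by
    ext x
    simp [PySem.Set.mem_add, Finset.mem_erase, Finset.mem_filter, and_comm, not_or]
    tauto
  rw [hset, Finset.card_erase_of_mem (by simp [Finset.mem_filter, hg, hn])]
  have : 0 < ((pvGridFin g).filter (fun c => c ∉ v)).card :=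
    Finset.card_pos.2 ⟨n, by simp [Finset.mem_filter, hg, hn]⟩
  omega

theorem pvStep_mu (g : List String) (p : Char) (c : PCell) (l : List PCell) :
    ∀ vs : PySem.Set PCell × List PCell,
      pvMu g (l.foldl (pvStep g p c) vs).1 (l.foldl (pvStep g p c) vs).2
        ≤ pvMu g vs.1 vs.2 := by
  induction l with
  | nil => intro vs; exact le_rfl
  | cons d l ih =>
    intro vs
    refine le_trans (ih (pvStep g p c vs d)) ?_
    unfold pvStep pvMu
    by_cases hguard : (pvValid g (pvNbr c d).1 (pvNbr c d).2
        && !(PySem.Set.contains vs.1 (pvNbr c d)) && (pvPlant g (pvNbr c d).1 (pvNbr c d).2 == p)) = true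
    · simp only [hguard, if_pos]
      have hv : pvValid g (pvNbr c d).1 (pvNbr c d).2 = true := by
        simp only [Bool.and_eq_true] at hguard; exact hguard.1.1
      have hns : pvNbr c d ∉ vs.1 := by
        simp only [Bool.and_eq_true, Bool.not_eq_true'] at hguard
        intro hmem
        have := hguard.1.2
        rw [PySem.Set.contains_eq_listContains] at this
        simp at this
        exact this hmem
      have hg2 : pvNbr c d ∈ pvGridFin g := by
        have := pvValid_mem_grid hv
        simpa using this
      have := pvUnseen_drop hg2 hns
      simp only [List.length_cons]
      omega
    · rw [if_neg hguard]

theorem pvMu_cons (g : List String) (v : List PCell) (c : PCell) (s : List PCell) :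
    pvMu g v (c :: s) = pvMu g v s + 1 := by
  simp [pvMu]; omega

-- ---- reachability within a plant group ----
def pvQ (g : List String) (p : Char) (x : PCell) : Prop :=
  pvValid g x.1 x.2 = true ∧ pvPlant g x.1 x.2 = p

inductive pvReach (g : List String) (p : Char) (s : PCell) : PCell → Prop
  | refl : pvReach g p s s
  | step (y d : PCell) : pvReach g p s y → d ∈ pvDirs → pvQ g p (pvNbr y d) →
      pvReach g p s (pvNbr y d)

theorem pvSame_iff {g : List String} {p : Char} {x y : Int} :
    pvSame g p x y = true ↔ pvQ g p ((x, y) : PCell) := by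
  simp [pvSame, pvQ, pvValid, Bool.and_eq_true, beq_iff_eq, and_assoc]

theorem mem_pvNbrsB {c y : PCell} : y ∈ pvNbrsB c ↔ ∃ d ∈ pvDirs, y = pvNbr c d := by
  constructor
  · intro h
    simp only [pvNbrsB, List.mem_cons, List.not_mem_nil, or_false] at h
    rcases h with rfl | rfl | rfl | rfl
    · exact ⟨(-1, 0), by simp [pvDirs], by simp [pvNbr, Prod.ext_iff]; omega⟩
    · exact ⟨(1, 0), by simp [pvDirs], by simp [pvNbr, Prod.ext_iff]⟩
    · exact ⟨(0, -1), by simp [pvDirs], by simp [pvNbr, Prod.ext_iff]; omega⟩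
    · exact ⟨(0, 1), by simp [pvDirs], by simp [pvNbr, Prod.ext_iff]⟩
  · rintro ⟨d, hd, rfl⟩
    have hd' : d = (1, 0) ∨ d = (-1, 0) ∨ d = (0, 1) ∨ d = (0, -1) := by
      simpa [pvDirs] using hd
    rcases hd' with rfl | rfl | rfl | rfl <;>
      simp [pvNbrsB, pvNbr, Prod.ext_iff] <;> omega

theorem pvDirs_symm : ∀ d ∈ pvDirs, ∃ d' ∈ pvDirs, ∀ x : PCell, pvNbr (pvNbr x d) d' = x := by
  intro d hd
  simp only [pvDirs, List.mem_cons, List.mem_singleton] at hd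
  rcases hd with rfl | rfl | rfl | rfl | h
  · exact ⟨(-1, 0), by simp [pvDirs], fun x => by obtain ⟨a, b⟩ := x; simp [pvNbr]⟩
  · exact ⟨(1, 0), by simp [pvDirs], fun x => by obtain ⟨a, b⟩ := x; simp [pvNbr]⟩
  · exact ⟨(0, -1), by simp [pvDirs], fun x => by obtain ⟨a, b⟩ := x; simp [pvNbr]⟩
  · exact ⟨(0, 1), by simp [pvDirs], fun x => by obtain ⟨a, b⟩ := x; simp [pvNbr]⟩
  · cases h

-- ---- A's DFS: characterisation of the produced region ----
theorem pvScan_spec (g : List String) (p : Char) (c : PCell) :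
    ∀ (l : List PCell) (v s : List PCell), (∀ x ∈ s, x ∈ v) →
      (∀ x ∈ v, x ∈ (l.foldl (pvStep g p c) (v, s)).1) ∧
      (∀ x, x ∈ (l.foldl (pvStep g p c) (v, s)).1 ↔ x ∈ v ∨ x ∈ (l.foldl (pvStep g p c) (v, s)).2) ∧
      (∀ x ∈ (l.foldl (pvStep g p c) (v, s)).2, x ∈ s ∨ (x ∉ v ∧ pvQ g p x)) ∧
      (∀ x ∈ s, x ∈ (l.foldl (pvStep g p c) (v, s)).2) ∧
      (∀ d ∈ l, pvQ g p (pvNbr c d) → pvNbr c d ∈ (l.foldl (pvStep g p c) (v, s)).1) ∧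
      (∀ r : List PCell, (s ++ r).Nodup → (∀ x ∈ r, x ∈ v) →
        ((l.foldl (pvStep g p c) (v, s)).2 ++ r).Nodup) := by
  intro l
  induction l with
  | nil =>
    intro v s hsv
    refine ⟨fun x hx => hx, fun x => ⟨Or.inl, ?_⟩, fun x hx => Or.inl hx,
      fun x hx => hx, by simp, fun r h _ => h⟩
    rintro (hx | hx)
    · exact hx
    · exact hsv x hx
  | cons d l ih =>
    intro v s hsv
    simp only [List.foldl_cons]
    by_cases hguard : (pvValid g (pvNbr c d).1 (pvNbr c d).2
        && !(PySem.Set.contains (v, s).1 (pvNbr c d))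
        && (pvPlant g (pvNbr c d).1 (pvNbr c d).2 == p)) = true
    · -- step pushes n
      have hstep : pvStep g p c (v, s) d
          = (PySem.Set.add v (pvNbr c d), pvNbr c d :: s) := by
        unfold pvStep; rw [if_pos hguard]
      simp only [Bool.and_eq_true, Bool.not_eq_true', beq_iff_eq,
        decide_eq_true_eq] at hguard
      have hv : pvValid g (pvNbr c d).1 (pvNbr c d).2 = true := hguard.1.1
      have hnv : pvNbr c d ∉ v := by
        have := hguard.1.2
        rw [PySem.Set.contains_eq_listContains] at this
        simpa using this
      have hq : pvQ g p (pvNbr c d) := ⟨hv, hguard.2⟩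
      rw [hstep]
      have hsv' : ∀ x ∈ pvNbr c d :: s, x ∈ PySem.Set.add v (pvNbr c d) := by
        intro x hx
        rw [PySem.Set.mem_add]
        rcases List.mem_cons.1 hx with rfl | hx
        · exact Or.inr rfl
        · exact Or.inl (hsv x hx)
      obtain ⟨C1, C2, C3, C4, C5, C6⟩ := ih (PySem.Set.add v (pvNbr c d)) (pvNbr c d :: s) hsv'
      refine ⟨?_, ?_, ?_, ?_, ?_, ?_⟩
      · intro x hx; exact C1 x (by rw [PySem.Set.mem_add]; exact Or.inl hx)
      · intro x
        rw [C2 x, PySem.Set.mem_add]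
        constructor
        · rintro ((hx | rfl) | hx)
          · exact Or.inl hx
          · exact Or.inr (C4 _ (List.mem_cons_self))
          · exact Or.inr hx
        · rintro (hx | hx)
          · exact Or.inl (Or.inl hx)
          · exact Or.inr hx
      · intro x hx
        rcases C3 x hx with hx' | ⟨hxv, hxq⟩
        · rcases List.mem_cons.1 hx' with rfl | hx''
          · exact Or.inr ⟨hnv, hq⟩
          · exact Or.inl hx''
        · refine Or.inr ⟨fun hxv' => hxv ?_, hxq⟩
          rw [PySem.Set.mem_add]; exact Or.inl hxv'
      · intro x hx; exact C4 x (List.mem_cons_of_mem _ hx)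
      · intro d' hd' hq'
        rcases List.mem_cons.1 hd' with rfl | hd''
        · exact C1 _ (by rw [PySem.Set.mem_add]; exact Or.inr rfl)
        · exact C5 d' hd'' hq'
      · intro r hnd hrv
        refine C6 r ?_ ?_
        · simp only [List.cons_append, List.nodup_cons]
          refine ⟨fun hmem => ?_, hnd⟩
          rcases List.mem_append.1 hmem with hx | hx
          · exact hnv (hsv _ hx)
          · exact hnv (hrv _ hx)
        · intro x hx
          rw [PySem.Set.mem_add]; exact Or.inl (hrv x hx)
    · -- no push
      have hstep : pvStep g p c (v, s) d = (v, s) := by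
        unfold pvStep; rw [if_neg hguard]
      rw [hstep]
      obtain ⟨C1, C2, C3, C4, C5, C6⟩ := ih v s hsv
      refine ⟨C1, C2, C3, C4, ?_, C6⟩
      intro d' hd' hq'
      rcases List.mem_cons.1 hd' with rfl | hd''
      · -- guard failed though pvQ holds: n was already visited
        have hvv : pvValid g (pvNbr c d').1 (pvNbr c d').2 = true := hq'.1
        have hpp : (pvPlant g (pvNbr c d').1 (pvNbr c d').2 == p) = true := by
          simp [hq'.2]
        have hcont : PySem.Set.contains (v, s).1 (pvNbr c d') = true := by
          by_contra hc
          apply hguard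
          simp [hvv, hpp, Bool.not_eq_true] at hc ⊢
          simp [hc]
        have : pvNbr c d' ∈ v := by
          rw [PySem.Set.contains_eq_listContains] at hcont
          simpa using hcont
        exact C1 _ this
      · exact C5 d' hd'' hq'

theorem pvScan_inv (g : List String) (p : Char) (c : PCell) (v s r : List PCell)
    (h1 : ((c :: s) ++ r).Nodup) (h2 : ∀ x ∈ (c :: s) ++ r, x ∈ v) :
    (((pvDirs.foldl (pvStep g p c) (v, s)).2 ++ (r ++ [c])).Nodup) ∧
    (∀ x ∈ (pvDirs.foldl (pvStep g p c) (v, s)).2 ++ (r ++ [c]),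
      x ∈ (pvDirs.foldl (pvStep g p c) (v, s)).1) := by
  have hsv : ∀ x ∈ s, x ∈ v := fun x hx => h2 x (by simp [hx])
  obtain ⟨C1, C2, C3, C4, C5, C6⟩ := pvScan_spec g p c pvDirs v s hsv
  have hcv : c ∈ v := h2 c (by simp)
  have hrv : ∀ x ∈ r ++ [c], x ∈ v := by
    intro x hx
    rcases List.mem_append.1 hx with hx | hx
    · exact h2 x (by simp [hx])
    · simp at hx; subst hx; exact hcv
  constructor
  · refine C6 (r ++ [c]) ?_ hrv
    have hp : ((c :: s) ++ r).Perm (s ++ (r ++ [c])) := by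
      have h0 : (c :: s) ++ r = c :: (s ++ r) := by simp
      rw [h0, ← List.append_assoc]
      exact (List.perm_append_singleton c (s ++ r)).symm
    exact hp.nodup h1
  · intro x hx
    rcases List.mem_append.1 hx with hx | hx
    · exact (C2 x).2 (Or.inr hx)
    · exact C1 x (hrv x hx)

theorem pvDfsA_spec (g : List String) (p : Char) (v0 : List PCell) :
    ∀ (fuel : Nat) (v s r : List PCell),
      pvMu g v s ≤ fuel →
      (s ++ r).Nodup →
      (∀ x ∈ s ++ r, x ∈ v) →
      (∀ x, x ∈ v ↔ x ∈ v0 ∨ x ∈ s ++ r) →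
      (∀ x ∈ s ++ r, x ∉ v0) →
      (∀ x ∈ s ++ r, pvQ g p x) →
      (∀ x ∈ r, ∀ d ∈ pvDirs, pvQ g p (pvNbr x d) → pvNbr x d ∈ v) →
      (pvDfsA g p fuel v s r).1.Nodup ∧
      (∀ x, x ∈ (pvDfsA g p fuel v s r).2 ↔ x ∈ v0 ∨ x ∈ (pvDfsA g p fuel v s r).1) ∧
      (∀ x ∈ (pvDfsA g p fuel v s r).1, x ∉ v0) ∧
      (∀ x ∈ (pvDfsA g p fuel v s r).1, pvQ g p x) ∧
      (∀ x ∈ (pvDfsA g p fuel v s r).1, ∀ d ∈ pvDirs,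
        pvQ g p (pvNbr x d) → pvNbr x d ∈ (pvDfsA g p fuel v s r).2) := by
  intro fuel
  induction fuel with
  | zero =>
    intro v s r hf h1 h2 h3 h4 h5 h6
    have hs : s = [] := by
      have : s.length = 0 := by
        simp only [pvMu] at hf; omega
      exact List.length_eq_zero_iff.1 this
    subst hs
    simp only [pvDfsA]
    simp only [List.nil_append] at h1 h2 h3 h4 h5
    exact ⟨h1, h3, h4, h5, h6⟩
  | succ fuel ih =>
    intro v s r hf h1 h2 h3 h4 h5 h6
    cases s with
    | nil =>
      simp only [pvDfsA]
      simp only [List.nil_append] at h1 h2 h3 h4 h5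
      exact ⟨h1, h3, h4, h5, h6⟩
    | cons c stack =>
      simp only [pvDfsA]
      have hf' : pvMu g (pvDirs.foldl (pvStep g p c) (v, stack)).1
          (pvDirs.foldl (pvStep g p c) (v, stack)).2 ≤ fuel := by
        have hmu : pvMu g (pvDirs.foldl (pvStep g p c) (v, stack)).1
            (pvDirs.foldl (pvStep g p c) (v, stack)).2 ≤ pvMu g v stack :=
          pvStep_mu g p c pvDirs (v, stack)
        have hcons : pvMu g v (c :: stack) = pvMu g v stack + 1 := pvMu_cons g v c stack
        omega
      have hsv : ∀ x ∈ stack, x ∈ v := fun x hx => h2 x (by simp [hx])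
      obtain ⟨C1, C2, C3, C4, C5, C6⟩ := pvScan_spec g p c pvDirs v stack hsv
      obtain ⟨N1, N2⟩ := pvScan_inv g p c v stack r h1 h2
      have hv0sub : ∀ x ∈ v0, x ∈ v := fun x hx => (h3 x).2 (Or.inl hx)
      refine ih _ _ _ hf' N1 N2 ?_ ?_ ?_ ?_
      · intro x
        constructor
        · intro hx
          rcases (C2 x).1 hx with hx | hx
          · rcases (h3 x).1 hx with hx | hx
            · exact Or.inl hx
            · simp only [List.cons_append, List.mem_cons, List.mem_append] at hx
              refine Or.inr (List.mem_append.2 ?_)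
              rcases hx with rfl | hx | hx
              · exact Or.inr (List.mem_append.2 (Or.inr (by simp)))
              · exact Or.inl (C4 x hx)
              · exact Or.inr (List.mem_append.2 (Or.inl hx))
          · exact Or.inr (List.mem_append.2 (Or.inl hx))
        · intro hx
          rcases hx with hx | hx
          · exact C1 x ((h3 x).2 (Or.inl hx))
          · rcases List.mem_append.1 hx with hx | hx
            · exact (C2 x).2 (Or.inr hx)
            · rcases List.mem_append.1 hx with hx | hx
              · exact C1 x (h2 x (by simp [hx]))
              · simp only [List.mem_singleton] at hx
                subst hx
                exact C1 x (h2 x (by simp))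
      · intro x hx
        rcases List.mem_append.1 hx with hx | hx
        · rcases C3 x hx with hx | ⟨hxv, _⟩
          · exact h4 x (by simp [hx])
          · exact fun hx0 => hxv (hv0sub x hx0)
        · rcases List.mem_append.1 hx with hx | hx
          · exact h4 x (by simp [hx])
          · simp only [List.mem_singleton] at hx
            subst hx
            exact h4 x (by simp)
      · intro x hx
        rcases List.mem_append.1 hx with hx | hx
        · rcases C3 x hx with hx | ⟨_, hq⟩
          · exact h5 x (by simp [hx])
          · exact hq
        · rcases List.mem_append.1 hx with hx | hx
          · exact h5 x (by simp [hx])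
          · simp only [List.mem_singleton] at hx
            subst hx
            exact h5 x (by simp)
      · intro x hx d hd hq
        rcases List.mem_append.1 hx with hx | hx
        · exact C1 _ (h6 x hx d hd hq)
        · simp only [List.mem_singleton] at hx
          subst hx
          exact C5 d hd hq

def pvOutInv (g : List String) (v : List PCell) : Prop :=
  (∀ x ∈ v, pvValid g x.1 x.2 = true) ∧
  (∀ x ∈ v, ∀ d ∈ pvDirs, pvQ g (pvPlant g x.1 x.2) (pvNbr x d) → pvNbr x d ∈ v)

theorem pvRegion_spec (g : List String) (p : Char) (v0 : List PCell) (seed : PCell)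
    (fuel : Nat) (hf : pvMu g (PySem.Set.add v0 seed) [seed] ≤ fuel)
    (hnv : seed ∉ v0) (hQ : pvQ g p seed) (hplant : pvPlant g seed.1 seed.2 = p)
    (hinv : pvOutInv g v0) :
    (pvDfsA g p fuel (PySem.Set.add v0 seed) [seed] []).1.Nodup ∧
    (∀ x, x ∈ (pvDfsA g p fuel (PySem.Set.add v0 seed) [seed] []).2 ↔
      x ∈ v0 ∨ x ∈ (pvDfsA g p fuel (PySem.Set.add v0 seed) [seed] []).1) ∧
    (∀ x ∈ (pvDfsA g p fuel (PySem.Set.add v0 seed) [seed] []).1, pvQ g p x) ∧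
    (∀ x ∈ (pvDfsA g p fuel (PySem.Set.add v0 seed) [seed] []).1, ∀ d ∈ pvDirs,
      (pvQ g p (pvNbr x d) ↔ pvNbr x d ∈ (pvDfsA g p fuel (PySem.Set.add v0 seed) [seed] []).1)) ∧
    pvOutInv g (pvDfsA g p fuel (PySem.Set.add v0 seed) [seed] []).2 := by
  obtain ⟨D1, D2, D3, D4, D5⟩ := pvDfsA_spec g p v0 fuel (PySem.Set.add v0 seed) [seed] []
    hf
    (by simp)
    (by intro x hx; simp at hx; subst hx; rw [PySem.Set.mem_add]; exact Or.inr rfl)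
    (by intro x; rw [PySem.Set.mem_add]; simp [or_comm, eq_comm])
    (by intro x hx; simp at hx; subst hx; exact hnv)
    (by intro x hx; simp at hx; subst hx; exact hQ)
    (by simp)
  have hclosure : ∀ x ∈ (pvDfsA g p fuel (PySem.Set.add v0 seed) [seed] []).1, ∀ d ∈ pvDirs,
      (pvQ g p (pvNbr x d) ↔ pvNbr x d ∈ (pvDfsA g p fuel (PySem.Set.add v0 seed) [seed] []).1) := by
    intro x hx d hd
    constructor
    · intro hq
      have hmem := D5 x hx d hd hq
      rcases (D2 _).1 hmem with hmem0 | hmem1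
      · exfalso
        obtain ⟨d', hd', hdd'⟩ := pvDirs_symm d hd
        have hx0 : x ∈ v0 := by
          have := hinv.2 (pvNbr x d) hmem0 d' hd'
          rw [hdd'] at this
          apply this
          refine ⟨(D4 x hx).1, ?_⟩
          rw [hq.2, (D4 x hx).2]
        exact D3 x hx hx0
      · exact hmem1
    · intro hmem
      exact D4 _ hmem
  refine ⟨D1, D2, D4, hclosure, ?_, ?_⟩
  · intro x hx
    rcases (D2 x).1 hx with hx | hx
    · exact hinv.1 x hx
    · exact (D4 x hx).1
  · intro x hx d hd hq
    rcases (D2 x).1 hx with hx | hx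
    · exact (D2 _).2 (Or.inl (hinv.2 x hx d hd hq))
    · rw [(D4 x hx).2] at hq
      exact D5 x hx d hd hq

-- extra invariants for A's DFS: visited grows, popped cells are reachable
theorem pvScan_mono (g : List String) (p : Char) (c : PCell) :
    ∀ (l : List PCell) (st : PySem.Set PCell × List PCell) (x : PCell),
      x ∈ st.1 → x ∈ (l.foldl (pvStep g p c) st).1 := by
  intro l
  induction l with
  | nil => intro st x hx; exact hx
  | cons d l ih =>
    intro st x hx
    simp only [List.foldl_cons]
    refine ih _ x ?_
    by_cases hguard : (pvValid g (pvNbr c d).1 (pvNbr c d).2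
        && !(PySem.Set.contains st.1 (pvNbr c d))
        && (pvPlant g (pvNbr c d).1 (pvNbr c d).2 == p)) = true
    · have hstep : pvStep g p c st d = (PySem.Set.add st.1 (pvNbr c d), pvNbr c d :: st.2) := by
        unfold pvStep; rw [if_pos hguard]
      rw [hstep]
      rw [PySem.Set.mem_add]; exact Or.inl hx
    · have hstep : pvStep g p c st d = st := by
        unfold pvStep; rw [if_neg hguard]
      rw [hstep]; exact hx

theorem pvDfsA_vmono (g : List String) (p : Char) :
    ∀ (fuel : Nat) (v s r : List PCell) (x : PCell),
      x ∈ v → x ∈ (pvDfsA g p fuel v s r).2 := by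
  intro fuel
  induction fuel with
  | zero => intro v s r x hx; exact hx
  | succ fuel ih =>
    intro v s r x hx
    cases s with
    | nil => exact hx
    | cons c stack =>
      simp only [pvDfsA]
      exact ih _ _ _ x (pvScan_mono g p c pvDirs (v, stack) x hx)

theorem pvScan_src (g : List String) (p : Char) (c : PCell) :
    ∀ (l : List PCell) (st : PySem.Set PCell × List PCell),
      ∀ x ∈ (l.foldl (pvStep g p c) st).2,
        x ∈ st.2 ∨ (pvQ g p x ∧ ∃ d ∈ l, x = pvNbr c d) := by
  intro l
  induction l with
  | nil => intro st x hx; exact Or.inl hx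
  | cons d l ih =>
    intro st x hx
    simp only [List.foldl_cons] at hx
    rcases ih _ x hx with hx' | ⟨hq, d', hd', rfl⟩
    · unfold pvStep at hx'
      by_cases hguard : (pvValid g (pvNbr c d).1 (pvNbr c d).2
          && !(PySem.Set.contains st.1 (pvNbr c d))
          && (pvPlant g (pvNbr c d).1 (pvNbr c d).2 == p)) = true
      · rw [if_pos hguard] at hx'
        rcases List.mem_cons.1 hx' with rfl | hx''
        · simp only [Bool.and_eq_true, beq_iff_eq] at hguard
          exact Or.inr ⟨⟨hguard.1.1, hguard.2⟩, d, by simp⟩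
        · exact Or.inl hx''
      · rw [if_neg hguard] at hx'
        exact Or.inl hx'
    · exact Or.inr ⟨hq, d', by simp [hd']⟩

theorem pvDfsA_reach (g : List String) (p : Char) (seed : PCell) :
    ∀ (fuel : Nat) (v s r : List PCell),
      (∀ x ∈ s, pvReach g p seed x) →
      (∀ x ∈ r, pvReach g p seed x) →
      ∀ x ∈ (pvDfsA g p fuel v s r).1, pvReach g p seed x := by
  intro fuel
  induction fuel with
  | zero => intro v s r _ hr x hx; exact hr x hx
  | succ fuel ih =>
    intro v s r hs hr
    cases s with
    | nil => exact hr
    | cons c stack =>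
      simp only [pvDfsA]
      refine ih _ _ _ ?_ ?_
      · intro x hx
        rcases pvScan_src g p c pvDirs (v, stack) x hx with hx' | ⟨hq, d, hd, rfl⟩
        · exact hs x (by simp [hx'])
        · exact pvReach.step c d (hs c (by simp)) hd hq
      · intro x hx
        rcases List.mem_append.1 hx with hx | hx
        · exact hr x hx
        · simp only [List.mem_singleton] at hx; subst hx
          exact hs x (by simp)

theorem pvRegionA_char (g : List String) (p : Char) (v0 : List PCell) (seed : PCell)
    (hnv : seed ∉ v0) (hQs : pvQ g p seed) (hplant : pvPlant g seed.1 seed.2 = p)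
    (hinv : pvOutInv g v0) :
    (pvDfsA g p (pvMu g (PySem.Set.add v0 seed) [seed]) (PySem.Set.add v0 seed) [seed] []).1.Nodup ∧
    (∀ x, x ∈ (pvDfsA g p (pvMu g (PySem.Set.add v0 seed) [seed]) (PySem.Set.add v0 seed) [seed] []).1
      ↔ pvQ g p x ∧ pvReach g p seed x) ∧
    (∀ x, x ∈ (pvDfsA g p (pvMu g (PySem.Set.add v0 seed) [seed]) (PySem.Set.add v0 seed) [seed] []).2
      ↔ x ∈ v0 ∨ x ∈ (pvDfsA g p (pvMu g (PySem.Set.add v0 seed) [seed]) (PySem.Set.add v0 seed) [seed] []).1) ∧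
    pvOutInv g (pvDfsA g p (pvMu g (PySem.Set.add v0 seed) [seed]) (PySem.Set.add v0 seed) [seed] []).2 := by
  obtain ⟨R1, R2, R4, Rcl, ROut⟩ := pvRegion_spec g p v0 seed _ le_rfl hnv hQs hplant hinv
  have hseed : seed ∈ (pvDfsA g p (pvMu g (PySem.Set.add v0 seed) [seed]) (PySem.Set.add v0 seed) [seed] []).1 := by
    have hs2 : seed ∈ (pvDfsA g p (pvMu g (PySem.Set.add v0 seed) [seed]) (PySem.Set.add v0 seed) [seed] []).2 :=
      pvDfsA_vmono g p _ _ _ _ seed (by rw [PySem.Set.mem_add]; exact Or.inr rfl)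
    rcases (R2 seed).1 hs2 with h | h
    · exact absurd h hnv
    · exact h
  have hreach : ∀ x, pvReach g p seed x →
      x ∈ (pvDfsA g p (pvMu g (PySem.Set.add v0 seed) [seed]) (PySem.Set.add v0 seed) [seed] []).1 := by
    intro x hx
    induction hx with
    | refl => exact hseed
    | step y d hy hd hq ihy => exact (Rcl y ihy d hd).1 hq
  refine ⟨R1, ?_, R2, ROut⟩
  intro x
  constructor
  · intro hx
    exact ⟨R4 x hx, pvDfsA_reach g p seed _ _ _ _
      (by intro z hz; simp at hz; subst hz; exact pvReach.refl) (by simp) x hx⟩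
  · intro ⟨_, hx⟩
    exact hreach x hx

-- ---- B's flood fill: characterisation of the produced region ----
theorem pvFloodScan_mu (g : List String) (p : Char) :
    ∀ (l : List PCell) (st : PySem.Set PCell × List PCell),
      pvMu g (l.foldl (pvFloodStep g p) st).1 (l.foldl (pvFloodStep g p) st).2
        ≤ pvMu g st.1 st.2 := by
  intro l
  induction l with
  | nil => intro st; exact le_rfl
  | cons n l ih =>
    intro st
    refine le_trans (ih (pvFloodStep g p st n)) ?_
    unfold pvFloodStep pvMu
    by_cases hguard : (!(PySem.Set.contains st.1 n) && pvSame g p n.1 n.2) = true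
    · simp only [hguard, if_pos]
      simp only [Bool.and_eq_true, Bool.not_eq_true'] at hguard
      have hns : n ∉ st.1 := by
        have := hguard.1
        rw [PySem.Set.contains_eq_listContains] at this
        simpa using this
      have hq : pvQ g p n := pvSame_iff.1 hguard.2
      have hg2 : n ∈ pvGridFin g := by
        have := pvValid_mem_grid hq.1
        simpa using this
      have := pvUnseen_drop hg2 hns
      simp only [List.length_cons]
      omega
    · rw [if_neg hguard]

theorem pvFloodScan_spec (g : List String) (p : Char) :
    ∀ (l : List PCell) (reg f : List PCell), (∀ x ∈ f, x ∈ reg) → reg.Nodup →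
      (∀ x ∈ reg, x ∈ (l.foldl (pvFloodStep g p) (reg, f)).1) ∧
      (∀ x, x ∈ (l.foldl (pvFloodStep g p) (reg, f)).1 ↔
        x ∈ reg ∨ x ∈ (l.foldl (pvFloodStep g p) (reg, f)).2) ∧
      (∀ x ∈ (l.foldl (pvFloodStep g p) (reg, f)).2, x ∈ f ∨ (pvQ g p x ∧ x ∈ l)) ∧
      (∀ x ∈ f, x ∈ (l.foldl (pvFloodStep g p) (reg, f)).2) ∧
      (∀ y ∈ l, pvQ g p y → y ∈ (l.foldl (pvFloodStep g p) (reg, f)).1) ∧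
      (∀ x ∈ (l.foldl (pvFloodStep g p) (reg, f)).2, x ∈ (l.foldl (pvFloodStep g p) (reg, f)).1) ∧
      (l.foldl (pvFloodStep g p) (reg, f)).1.Nodup := by
  intro l
  induction l with
  | nil =>
    intro reg f hf hnd
    refine ⟨fun x hx => hx, fun x => ⟨Or.inl, ?_⟩, fun x hx => Or.inl hx,
      fun x hx => hx, by simp, hf, hnd⟩
    rintro (hx | hx)
    · exact hx
    · exact hf x hx
  | cons n l ih =>
    intro reg f hf hnd
    simp only [List.foldl_cons]
    by_cases hguard : (!(PySem.Set.contains reg n) && pvSame g p n.1 n.2) = true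
    · have hstep : pvFloodStep g p (reg, f) n = (PySem.Set.add reg n, n :: f) := by
        unfold pvFloodStep; rw [if_pos hguard]
      simp only [Bool.and_eq_true, Bool.not_eq_true'] at hguard
      have hnreg : n ∉ reg := by
        have := hguard.1
        rw [PySem.Set.contains_eq_listContains] at this
        simpa using this
      have hq : pvQ g p n := pvSame_iff.1 hguard.2
      rw [hstep]
      have hf' : ∀ x ∈ n :: f, x ∈ PySem.Set.add reg n := by
        intro x hx
        rw [PySem.Set.mem_add]
        rcases List.mem_cons.1 hx with rfl | hx
        · exact Or.inr rfl
        · exact Or.inl (hf x hx)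
      obtain ⟨F1, F2, F3, F4, F5, F6, F7⟩ :=
        ih (PySem.Set.add reg n) (n :: f) hf' (PySem.Set.nodup_add reg n hnd)
      refine ⟨?_, ?_, ?_, ?_, ?_, F6, F7⟩
      · intro x hx; exact F1 x (by rw [PySem.Set.mem_add]; exact Or.inl hx)
      · intro x
        rw [F2 x, PySem.Set.mem_add]
        constructor
        · rintro ((hx | rfl) | hx)
          · exact Or.inl hx
          · exact Or.inr (F4 _ (List.mem_cons_self))
          · exact Or.inr hx
        · rintro (hx | hx)
          · exact Or.inl (Or.inl hx)
          · exact Or.inr hx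
      · intro x hx
        rcases F3 x hx with hx' | ⟨hxq, hxl⟩
        · rcases List.mem_cons.1 hx' with rfl | hx''
          · exact Or.inr ⟨hq, by simp⟩
          · exact Or.inl hx''
        · exact Or.inr ⟨hxq, by simp [hxl]⟩
      · intro x hx; exact F4 x (List.mem_cons_of_mem _ hx)
      · intro y hy hqy
        rcases List.mem_cons.1 hy with rfl | hy'
        · exact F1 _ (by rw [PySem.Set.mem_add]; exact Or.inr rfl)
        · exact F5 y hy' hqy
    · have hstep : pvFloodStep g p (reg, f) n = (reg, f) := by
        unfold pvFloodStep; rw [if_neg hguard]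
      rw [hstep]
      obtain ⟨F1, F2, F3, F4, F5, F6, F7⟩ := ih reg f hf hnd
      refine ⟨F1, F2, ?_, F4, ?_, F6, F7⟩
      · intro x hx
        rcases F3 x hx with hx' | ⟨hxq, hxl⟩
        · exact Or.inl hx'
        · exact Or.inr ⟨hxq, by simp [hxl]⟩
      · intro y hy hqy
        rcases List.mem_cons.1 hy with rfl | hy'
        · -- guard failed though pvQ holds: y already in the region
          have hsame : pvSame g p y.1 y.2 = true := pvSame_iff.2 hqy
          have hcont : PySem.Set.contains reg y = true := by
            by_contra hc
            apply hguard
            simp [hsame, Bool.not_eq_true] at hc ⊢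
            simp [hc]
          have : y ∈ reg := by
            rw [PySem.Set.contains_eq_listContains] at hcont
            simpa using hcont
          exact F1 _ this
        · exact F5 y hy' hqy

theorem pvFlood_spec (g : List String) (p : Char) (seed : PCell) :
    ∀ (fuel : Nat) (reg f : List PCell),
      pvMu g reg f ≤ fuel →
      (∀ x ∈ f, x ∈ reg) →
      reg.Nodup →
      (∀ x ∈ reg, pvQ g p x) →
      (∀ x ∈ reg, pvReach g p seed x) →
      (∀ x ∈ reg, x ∈ f ∨ ∀ y ∈ pvNbrsB x, pvQ g p y → y ∈ reg) →
      (∀ x ∈ reg, x ∈ pvFlood g p fuel reg f) ∧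
      (pvFlood g p fuel reg f).Nodup ∧
      (∀ x ∈ pvFlood g p fuel reg f, pvQ g p x) ∧
      (∀ x ∈ pvFlood g p fuel reg f, pvReach g p seed x) ∧
      (∀ x ∈ pvFlood g p fuel reg f, ∀ y ∈ pvNbrsB x, pvQ g p y → y ∈ pvFlood g p fuel reg f) := by
  intro fuel
  induction fuel with
  | zero =>
    intro reg f hmu hf hnd hQ hR hC
    have hfe : f = [] := by
      have : f.length = 0 := by simp only [pvMu] at hmu; omega
      exact List.length_eq_zero_iff.1 this
    subst hfe
    simp only [pvFlood]
    refine ⟨fun x hx => hx, hnd, hQ, hR, ?_⟩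
    intro x hx
    rcases hC x hx with h | h
    · cases h
    · exact h
  | succ fuel ih =>
    intro reg f hmu hf hnd hQ hR hC
    cases f with
    | nil =>
      simp only [pvFlood]
      refine ⟨fun x hx => hx, hnd, hQ, hR, ?_⟩
      intro x hx
      rcases hC x hx with h | h
      · cases h
      · exact h
    | cons c f =>
      simp only [pvFlood]
      have hcreg : c ∈ reg := hf c (by simp)
      have hfsub : ∀ x ∈ f, x ∈ reg := fun x hx => hf x (by simp [hx])
      obtain ⟨F1, F2, F3, F4, F5, F6, F7⟩ := pvFloodScan_spec g p (pvNbrsB c) reg f hfsub hnd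
      have hmu' : pvMu g ((pvNbrsB c).foldl (pvFloodStep g p) (reg, f)).1
          ((pvNbrsB c).foldl (pvFloodStep g p) (reg, f)).2 ≤ fuel := by
        have h1 : pvMu g ((pvNbrsB c).foldl (pvFloodStep g p) (reg, f)).1
            ((pvNbrsB c).foldl (pvFloodStep g p) (reg, f)).2 ≤ pvMu g reg f :=
          pvFloodScan_mu g p (pvNbrsB c) (reg, f)
        have h2 : pvMu g reg (c :: f) = pvMu g reg f + 1 := pvMu_cons g reg c f
        omega
      have hQ' : ∀ x ∈ ((pvNbrsB c).foldl (pvFloodStep g p) (reg, f)).1, pvQ g p x := by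
        intro x hx
        rcases (F2 x).1 hx with hx | hx
        · exact hQ x hx
        · rcases F3 x hx with hx' | ⟨hq, _⟩
          · exact hQ x (hfsub x hx')
          · exact hq
      have hR' : ∀ x ∈ ((pvNbrsB c).foldl (pvFloodStep g p) (reg, f)).1, pvReach g p seed x := by
        intro x hx
        rcases (F2 x).1 hx with hx | hx
        · exact hR x hx
        · rcases F3 x hx with hx' | ⟨hq, hxl⟩
          · exact hR x (hfsub x hx')
          · obtain ⟨d, hd, rfl⟩ := mem_pvNbrsB.1 hxl
            exact pvReach.step c d (hR c hcreg) hd hq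
      have hC' : ∀ x ∈ ((pvNbrsB c).foldl (pvFloodStep g p) (reg, f)).1,
          x ∈ ((pvNbrsB c).foldl (pvFloodStep g p) (reg, f)).2
            ∨ ∀ y ∈ pvNbrsB x, pvQ g p y →
                y ∈ ((pvNbrsB c).foldl (pvFloodStep g p) (reg, f)).1 := by
        intro x hx
        rcases (F2 x).1 hx with hxr | hxf
        · rcases hC x hxr with hxcf | hcl
          · rcases List.mem_cons.1 hxcf with rfl | hxf'
            · right
              intro y hy hqy
              exact F5 y hy hqy
            · left; exact F4 x hxf'
          · right
            intro y hy hqy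
            exact F1 y (hcl y hy hqy)
        · left; exact hxf
      obtain ⟨G1, G2, G3, G4, G5⟩ := ih _ _ hmu' F6 F7 hQ' hR' hC'
      refine ⟨?_, G2, G3, G4, G5⟩
      intro x hx
      exact G1 x (F1 x hx)

theorem pvAdd_empty (x : PCell) : PySem.Set.add (PySem.Set.empty : PySem.Set PCell) x = [x] := by
  simp [PySem.Set.add, PySem.Set.empty]

theorem pvFloodB_char (g : List String) (p : Char) (seed : PCell) (hQs : pvQ g p seed) :
    (pvFlood g p (pvMu g (PySem.Set.add PySem.Set.empty seed) [seed])
      (PySem.Set.add PySem.Set.empty seed) [seed]).Nodup ∧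
    (∀ x, x ∈ pvFlood g p (pvMu g (PySem.Set.add PySem.Set.empty seed) [seed])
        (PySem.Set.add PySem.Set.empty seed) [seed]
      ↔ pvQ g p x ∧ pvReach g p seed x) := by
  rw [pvAdd_empty]
  obtain ⟨G1, G2, G3, G4, G5⟩ := pvFlood_spec g p seed (pvMu g [seed] [seed]) [seed] [seed]
    le_rfl (by simp) (by simp)
    (by intro x hx; simp at hx; subst hx; exact hQs)
    (by intro x hx; simp at hx; subst hx; exact pvReach.refl)
    (by intro x hx; exact Or.inl hx)
  have hseed : seed ∈ pvFlood g p (pvMu g [seed] [seed]) [seed] [seed] := G1 seed (by simp)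
  have hreach : ∀ x, pvReach g p seed x → x ∈ pvFlood g p (pvMu g [seed] [seed]) [seed] [seed] := by
    intro x hx
    induction hx with
    | refl => exact hseed
    | step y d hy hd hq ihy =>
      exact G5 y ihy (pvNbr y d) (mem_pvNbrsB.2 ⟨d, hd, rfl⟩) hq
  refine ⟨G2, fun x => ⟨fun hx => ⟨G3 x hx, G4 x hx⟩, fun ⟨_, hx⟩ => hreach x hx⟩⟩

-- ---- per-cell counting kernels and the corner-counting identity ----
def pvI (S : Finset PCell) (c v : PCell) : Int := if (c.1 + v.1, c.2 + v.2) ∈ S then 1 else 0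
def pvP1 (S : Finset PCell) (v : PCell) : Int := ∑ c ∈ S, pvI S c v
def pvP2 (S : Finset PCell) (v u : PCell) : Int := ∑ c ∈ S, pvI S c v * pvI S c u
def pvP3 (S : Finset PCell) (v u w : PCell) : Int := ∑ c ∈ S, pvI S c v * pvI S c u * pvI S c w

theorem pvShift (S : Finset PCell) (v : PCell) (φ : PCell → Int) :
    ∑ c ∈ S, (if (c.1 + v.1, c.2 + v.2) ∈ S then φ (c.1 + v.1, c.2 + v.2) else 0)
      = ∑ c ∈ S, (if (c.1 - v.1, c.2 - v.2) ∈ S then φ c else 0) := by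
  rw [← Finset.sum_filter, ← Finset.sum_filter]
  refine Finset.sum_nbij' (fun c => (c.1 + v.1, c.2 + v.2)) (fun c => (c.1 - v.1, c.2 - v.2))
    ?_ ?_ ?_ ?_ ?_
  · intro a ha
    simp only [Finset.mem_filter] at ha ⊢
    constructor
    · exact ha.2
    · have : (a.1 + v.1 - v.1, a.2 + v.2 - v.2) = (a.1, a.2) := by
        rw [Prod.mk.injEq]; omega
      rw [this]
      exact ha.1
  · intro b hb
    simp only [Finset.mem_filter] at hb ⊢
    constructor
    · exact hb.2
    · have : (b.1 - v.1 + v.1, b.2 - v.2 + v.2) = (b.1, b.2) := by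
        rw [Prod.mk.injEq]; omega
      rw [this]
      exact hb.1
  · intro a _
    show ((a.1 + v.1 - v.1, a.2 + v.2 - v.2) : PCell) = a
    rw [Prod.ext_iff]; constructor <;> (dsimp; omega)
  · intro b _
    show ((b.1 - v.1 + v.1, b.2 - v.2 + v.2) : PCell) = b
    rw [Prod.ext_iff]; constructor <;> (dsimp; omega)
  · intro a _
    rfl

theorem pvP1_shift (S : Finset PCell) (v : PCell) :
    pvP1 S v = pvP1 S (-v.1, -v.2) := by
  have h := pvShift S v (fun _ => (1 : Int))
  simpa [pvP1, pvI, sub_eq_add_neg] using h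

theorem pvP2_symm (S : Finset PCell) (v u : PCell) : pvP2 S v u = pvP2 S u v := by
  unfold pvP2
  exact Finset.sum_congr rfl (fun c _ => mul_comm _ _)

theorem pvP3_symm12 (S : Finset PCell) (v u w : PCell) : pvP3 S v u w = pvP3 S u v w := by
  unfold pvP3
  exact Finset.sum_congr rfl (fun c _ => by ring)

theorem pvP3_symm23 (S : Finset PCell) (v u w : PCell) : pvP3 S v u w = pvP3 S v w u := by
  unfold pvP3
  exact Finset.sum_congr rfl (fun c _ => by ring)

theorem pvP2_shift (S : Finset PCell) (v u : PCell) :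
    pvP2 S v u = pvP2 S (-v.1, -v.2) (u.1 - v.1, u.2 - v.2) := by
  have h := pvShift S v (fun b => pvI S b (u.1 - v.1, u.2 - v.2))
  have hl : ∀ c : PCell,
      (if (c.1 + v.1, c.2 + v.2) ∈ S
        then pvI S (c.1 + v.1, c.2 + v.2) (u.1 - v.1, u.2 - v.2) else 0)
      = pvI S c v * pvI S c u := by
    intro c
    unfold pvI
    have he : (c.1 + v.1 + (u.1 - v.1), c.2 + v.2 + (u.2 - v.2)) = (c.1 + u.1, c.2 + u.2) := by
      rw [Prod.mk.injEq]; constructor <;> ring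
    rw [he]
    split_ifs <;> ring
  have hr : ∀ c : PCell,
      (if (c.1 - v.1, c.2 - v.2) ∈ S then pvI S c (u.1 - v.1, u.2 - v.2) else 0)
      = pvI S c (-v.1, -v.2) * pvI S c (u.1 - v.1, u.2 - v.2) := by
    intro c
    unfold pvI
    have he : (c.1 + -v.1, c.2 + -v.2) = (c.1 - v.1, c.2 - v.2) := by
      rw [Prod.mk.injEq]; constructor <;> ring
    rw [he]
    split_ifs <;> ring
  calc pvP2 S v u = ∑ c ∈ S, (if (c.1 + v.1, c.2 + v.2) ∈ S
          then pvI S (c.1 + v.1, c.2 + v.2) (u.1 - v.1, u.2 - v.2) else 0) :=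
        Finset.sum_congr rfl (fun c _ => (hl c).symm)
    _ = ∑ c ∈ S, (if (c.1 - v.1, c.2 - v.2) ∈ S then pvI S c (u.1 - v.1, u.2 - v.2) else 0) := h
    _ = pvP2 S (-v.1, -v.2) (u.1 - v.1, u.2 - v.2) :=
        Finset.sum_congr rfl (fun c _ => hr c)

theorem pvP3_shift (S : Finset PCell) (v u w : PCell) :
    pvP3 S v u w = pvP3 S (-v.1, -v.2) (u.1 - v.1, u.2 - v.2) (w.1 - v.1, w.2 - v.2) := by
  have h := pvShift S v (fun b => pvI S b (u.1 - v.1, u.2 - v.2) * pvI S b (w.1 - v.1, w.2 - v.2))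
  have hl : ∀ c : PCell,
      (if (c.1 + v.1, c.2 + v.2) ∈ S
        then pvI S (c.1 + v.1, c.2 + v.2) (u.1 - v.1, u.2 - v.2)
          * pvI S (c.1 + v.1, c.2 + v.2) (w.1 - v.1, w.2 - v.2) else 0)
      = pvI S c v * pvI S c u * pvI S c w := by
    intro c
    unfold pvI
    have he : (c.1 + v.1 + (u.1 - v.1), c.2 + v.2 + (u.2 - v.2)) = (c.1 + u.1, c.2 + u.2) := by
      rw [Prod.mk.injEq]; constructor <;> ring
    have he2 : (c.1 + v.1 + (w.1 - v.1), c.2 + v.2 + (w.2 - v.2)) = (c.1 + w.1, c.2 + w.2) := by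
      rw [Prod.mk.injEq]; constructor <;> ring
    rw [he, he2]
    split_ifs <;> ring
  have hr : ∀ c : PCell,
      (if (c.1 - v.1, c.2 - v.2) ∈ S
        then pvI S c (u.1 - v.1, u.2 - v.2) * pvI S c (w.1 - v.1, w.2 - v.2) else 0)
      = pvI S c (-v.1, -v.2) * pvI S c (u.1 - v.1, u.2 - v.2) * pvI S c (w.1 - v.1, w.2 - v.2) := by
    intro c
    unfold pvI
    have he : (c.1 + -v.1, c.2 + -v.2) = (c.1 - v.1, c.2 - v.2) := by
      rw [Prod.mk.injEq]; constructor <;> ring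
    rw [he]
    split_ifs <;> ring
  calc pvP3 S v u w = _ := Finset.sum_congr rfl (fun c _ => (hl c).symm)
    _ = _ := h
    _ = pvP3 S (-v.1, -v.2) (u.1 - v.1, u.2 - v.2) (w.1 - v.1, w.2 - v.2) :=
        Finset.sum_congr rfl (fun c _ => hr c)

def pvEF (S : Finset PCell) (c : PCell) : Int :=
  (if (c.1 + 1, c.2) ∉ S then 1 else 0) + (if (c.1 - 1, c.2) ∉ S then 1 else 0) +
  (if (c.1, c.2 + 1) ∉ S then 1 else 0) + (if (c.1, c.2 - 1) ∉ S then 1 else 0)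

def pvSF (S : Finset PCell) (c : PCell) : Int :=
  (if (c.1 + 1, c.2) ∈ S then
     (if (c.1, c.2 - 1) ∉ S ∧ (c.1 + 1, c.2 - 1) ∉ S then 1 else 0) +
     (if (c.1, c.2 + 1) ∉ S ∧ (c.1 + 1, c.2 + 1) ∉ S then 1 else 0) else 0) +
  (if (c.1, c.2 + 1) ∈ S then
     (if (c.1 - 1, c.2) ∉ S ∧ (c.1 - 1, c.2 + 1) ∉ S then 1 else 0) +
     (if (c.1 + 1, c.2) ∉ S ∧ (c.1 + 1, c.2 + 1) ∉ S then 1 else 0) else 0)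

def pvKpairF (S : Finset PCell) (c : PCell) (dx dy : Int) : Int :=
  if (c.1 + dx, c.2) ∉ S ∧ (c.1, c.2 + dy) ∉ S then 1
  else if (c.1 + dx, c.2) ∈ S ∧ (c.1, c.2 + dy) ∈ S ∧ (c.1 + dx, c.2 + dy) ∉ S then 1
  else 0

def pvKF (S : Finset PCell) (c : PCell) : Int :=
  pvKpairF S c (-1) (-1) + pvKpairF S c (-1) 1 + pvKpairF S c 1 (-1) + pvKpairF S c 1 1

theorem pvEF_poly (S : Finset PCell) (c : PCell) :
    pvEF S c = 4 - (pvI S c (1, 0) + pvI S c (-1, 0) + pvI S c (0, 1) + pvI S c (0, -1)) := by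
  unfold pvEF pvI
  simp only [ite_not]
  norm_num [sub_eq_add_neg]
  split_ifs <;> ring

theorem pvSF_poly (S : Finset PCell) (c : PCell) :
    pvSF S c =
      (pvI S c (1, 0) - pvI S c (1, 0) * pvI S c (0, -1)
        - pvI S c (1, 0) * pvI S c (1, -1)
        + pvI S c (1, 0) * pvI S c (0, -1) * pvI S c (1, -1)) +
      (pvI S c (1, 0) - pvI S c (1, 0) * pvI S c (0, 1)
        - pvI S c (1, 0) * pvI S c (1, 1)
        + pvI S c (1, 0) * pvI S c (0, 1) * pvI S c (1, 1)) +
      (pvI S c (0, 1) - pvI S c (0, 1) * pvI S c (-1, 0)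
        - pvI S c (0, 1) * pvI S c (-1, 1)
        + pvI S c (0, 1) * pvI S c (-1, 0) * pvI S c (-1, 1)) +
      (pvI S c (0, 1) - pvI S c (0, 1) * pvI S c (1, 0)
        - pvI S c (0, 1) * pvI S c (1, 1)
        + pvI S c (0, 1) * pvI S c (1, 0) * pvI S c (1, 1)) := by
  unfold pvSF pvI
  norm_num [sub_eq_add_neg]
  by_cases h1 : (c.1 + 1, c.2) ∈ S <;>
  by_cases h2 : (c.1, c.2 + -1) ∈ S <;>
  by_cases h3 : (c.1 + 1, c.2 + -1) ∈ S <;>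
  by_cases h4 : (c.1, c.2 + 1) ∈ S <;>
  by_cases h5 : (c.1 + 1, c.2 + 1) ∈ S <;>
  by_cases h6 : (c.1 + -1, c.2) ∈ S <;>
  by_cases h7 : (c.1 + -1, c.2 + 1) ∈ S <;>
  simp [h1, h2, h3, h4, h5, h6, h7]

theorem pvKpairF_poly (S : Finset PCell) (c : PCell) (dx dy : Int) :
    pvKpairF S c dx dy =
      1 - pvI S c (dx, 0) - pvI S c (0, dy)
        + pvI S c (dx, 0) * pvI S c (0, dy)
        + pvI S c (dx, 0) * pvI S c (0, dy)
        - pvI S c (dx, 0) * pvI S c (0, dy) * pvI S c (dx, dy) := by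
  unfold pvKpairF pvI
  by_cases h1 : (c.1 + dx, c.2) ∈ S <;>
  by_cases h2 : (c.1, c.2 + dy) ∈ S <;>
  by_cases h3 : (c.1 + dx, c.2 + dy) ∈ S <;>
  simp [h1, h2, h3]

theorem pvGeom (S : Finset PCell) :
    (∑ c ∈ S, pvEF S c) - (∑ c ∈ S, pvSF S c) = ∑ c ∈ S, pvKF S c := by
  have hE := Finset.sum_congr rfl (fun c (_ : c ∈ S) => pvEF_poly S c)
  have hS := Finset.sum_congr rfl (fun c (_ : c ∈ S) => pvSF_poly S c)
  have hK := Finset.sum_congr rfl (fun c (_ : c ∈ S) => by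
    show pvKF S c = _
    unfold pvKF
    rw [pvKpairF_poly S c (-1) (-1), pvKpairF_poly S c (-1) 1,
        pvKpairF_poly S c 1 (-1), pvKpairF_poly S c 1 1])
  rw [hE, hS, hK]
  simp only [Finset.sum_add_distrib, Finset.sum_sub_distrib, Finset.sum_const,
    nsmul_eq_mul, mul_one]
  have q1 : pvP1 S (-1, 0) = pvP1 S (1, 0) := by
    have h := pvP1_shift S (-1, 0); norm_num at h; exact h
  have q2 : pvP1 S (0, -1) = pvP1 S (0, 1) := by
    have h := pvP1_shift S (0, -1); norm_num at h; exact h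
  have q3 : pvP2 S (1, 0) (1, -1) = pvP2 S (-1, 0) (0, -1) := by
    have h := pvP2_shift S (1, 0) (1, -1); norm_num at h; exact h
  have q4 : pvP2 S (1, 0) (1, 1) = pvP2 S (-1, 0) (0, 1) := by
    have h := pvP2_shift S (1, 0) (1, 1); norm_num at h; exact h
  have q5 : pvP2 S (0, 1) (-1, 0) = pvP2 S (-1, 0) (0, 1) := pvP2_symm S (0, 1) (-1, 0)
  have q6 : pvP2 S (0, 1) (-1, 1) = pvP2 S (-1, 0) (0, -1) := by
    have h := pvP2_shift S (0, 1) (-1, 1); norm_num at h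
    rw [h]; exact pvP2_symm S (0, -1) (-1, 0)
  have q7 : pvP2 S (0, 1) (1, 0) = pvP2 S (1, 0) (0, 1) := pvP2_symm S (0, 1) (1, 0)
  have q8 : pvP2 S (0, 1) (1, 1) = pvP2 S (1, 0) (0, -1) := by
    have h := pvP2_shift S (0, 1) (1, 1); norm_num at h
    rw [h]; exact pvP2_symm S (0, -1) (1, 0)
  have q9 : pvP3 S (0, 1) (-1, 0) (-1, 1) = pvP3 S (-1, 0) (0, 1) (-1, 1) :=
    pvP3_symm12 S (0, 1) (-1, 0) (-1, 1)
  have q10 : pvP3 S (0, 1) (1, 0) (1, 1) = pvP3 S (1, 0) (0, 1) (1, 1) :=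
    pvP3_symm12 S (0, 1) (1, 0) (1, 1)
  have q11 : pvP3 S (-1, 0) (0, -1) (-1, -1) = pvP3 S (1, 0) (0, -1) (1, -1) := by
    have h := pvP3_shift S (-1, 0) (0, -1) (-1, -1); norm_num at h
    rw [h]; exact pvP3_symm23 S (1, 0) (1, -1) (0, -1)
  have q12 : pvP3 S (1, 0) (0, -1) (1, -1) = pvP3 S (1, 0) (0, 1) (1, 1) := by
    have a1 : pvP3 S (1, 0) (0, -1) (1, -1) = pvP3 S (0, -1) (1, 0) (1, -1) :=
      pvP3_symm12 S (1, 0) (0, -1) (1, -1)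
    have a2 := pvP3_shift S (0, -1) (1, 0) (1, -1)
    norm_num at a2
    have a3 : pvP3 S (0, 1) (1, 1) (1, 0) = pvP3 S (0, 1) (1, 0) (1, 1) :=
      pvP3_symm23 S (0, 1) (1, 1) (1, 0)
    have a4 : pvP3 S (0, 1) (1, 0) (1, 1) = pvP3 S (1, 0) (0, 1) (1, 1) :=
      pvP3_symm12 S (0, 1) (1, 0) (1, 1)
    rw [a1, a2, a3, a4]
  have q13 : pvP3 S (-1, 0) (0, 1) (-1, 1) = pvP3 S (1, 0) (0, 1) (1, 1) := by
    have h := pvP3_shift S (-1, 0) (0, 1) (-1, 1); norm_num at h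
    rw [h]; exact pvP3_symm23 S (1, 0) (1, 1) (0, 1)
  simp only [pvP1, pvP2, pvP3] at q1 q2 q3 q4 q5 q6 q7 q8 q9 q10 q11 q12 q13
  omega

-- ---- A's two passes as sums over the region ----
theorem pvFoldl_add {α : Type} (f : α → Int) :
    ∀ (l : List α) (a : Int), l.foldl (fun acc c => acc + f c) a = a + (l.map f).sum := by
  intro l
  induction l with
  | nil => intro a; simp
  | cons x l ih => intro a; simp [ih]; ring

def pvECell (g : List String) (c : PCell) : Int :=
  (if ¬ (pvValid g (c.1 + 1) c.2 = true) ∨ pvPlant g (c.1 + 1) c.2 ≠ pvPlant g c.1 c.2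
    then 1 else 0) +
  (if ¬ (pvValid g (c.1 - 1) c.2 = true) ∨ pvPlant g (c.1 - 1) c.2 ≠ pvPlant g c.1 c.2
    then 1 else 0) +
  (if ¬ (pvValid g c.1 (c.2 + 1) = true) ∨ pvPlant g c.1 (c.2 + 1) ≠ pvPlant g c.1 c.2
    then 1 else 0) +
  (if ¬ (pvValid g c.1 (c.2 - 1) = true) ∨ pvPlant g c.1 (c.2 - 1) ≠ pvPlant g c.1 c.2
    then 1 else 0)

theorem pvPerim_inner (g : List String) (c : PCell) (res : Int) :
    pvDirs.foldl (fun res d =>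
      if ¬ (pvValid g (c.1 + d.1) (c.2 + d.2) = true)
          ∨ pvPlant g (c.1 + d.1) (c.2 + d.2) ≠ pvPlant g c.1 c.2
      then res + 1 else res) res = res + pvECell g c := by
  simp only [pvDirs, List.foldl_cons, List.foldl_nil, pvECell, add_zero, ← sub_eq_add_neg]
  split_ifs <;> ring

theorem pvPerimA_eq (g : List String) (R : List PCell) :
    pvPerimA g R = (R.map (pvECell g)).sum := by
  unfold pvPerimA
  simp only [pvPerim_inner]
  rw [pvFoldl_add]
  simp

def pvSCell (region : List PCell) (c : PCell) : Int :=
  (if (c.1 + 1, c.2) ∈ region then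
     ((if (c.1, c.2 - 1) ∉ region ∧ (c.1 + 1, c.2 - 1) ∉ region then 1 else 0) +
      (if (c.1, c.2 + 1) ∉ region ∧ (c.1 + 1, c.2 + 1) ∉ region then 1 else 0)) else 0) +
  (if (c.1, c.2 + 1) ∈ region then
     ((if (c.1 - 1, c.2) ∉ region ∧ (c.1 - 1, c.2 + 1) ∉ region then 1 else 0) +
      (if (c.1 + 1, c.2) ∉ region ∧ (c.1 + 1, c.2 + 1) ∉ region then 1 else 0)) else 0)

theorem pvShared_body (region : List PCell) (c : PCell) (res : Int) :
    (let res1 := if (c.1 + 1, c.2) ∈ region then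
        [c.2 - 1, c.2 + 1].foldl (fun res y2 =>
          if (c.1, y2) ∉ region ∧ (c.1 + 1, y2) ∉ region then res + 1 else res) res
      else res
    if (c.1, c.2 + 1) ∈ region then
        [c.1 - 1, c.1 + 1].foldl (fun res x2 =>
          if (x2, c.2) ∉ region ∧ (x2, c.2 + 1) ∉ region then res + 1 else res) res1
      else res1) = res + pvSCell region c := by
  simp only [List.foldl_cons, List.foldl_nil, pvSCell]
  split_ifs <;> ring

theorem pvSharedA_eq (R : List PCell) :
    pvSharedA R = (R.map (pvSCell R)).sum := by
  unfold pvSharedA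
  simp only [pvShared_body]
  rw [pvFoldl_add]
  simp

theorem pvSum_toFinset (f : PCell → Int) (R : List PCell) (h : R.Nodup) :
    (R.map f).sum = ∑ c ∈ R.toFinset, f c :=
  (List.sum_toFinset f h).symm

theorem pvSCell_eq (R : List PCell) (c : PCell) : pvSCell R c = pvSF R.toFinset c := by
  unfold pvSCell pvSF
  simp only [List.mem_toFinset]

theorem pvECell_eq (g : List String) (p : Char) (R : List PCell) (c : PCell) (hc : c ∈ R)
    (hQ : ∀ x ∈ R, pvQ g p x)
    (hcl : ∀ x ∈ R, ∀ d ∈ pvDirs, (pvQ g p (pvNbr x d) ↔ pvNbr x d ∈ R)) :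
    pvECell g c = pvEF R.toFinset c := by
  have hp : pvPlant g c.1 c.2 = p := (hQ c hc).2
  have bridge : ∀ d ∈ pvDirs,
      ((¬ (pvValid g (pvNbr c d).1 (pvNbr c d).2 = true)
        ∨ pvPlant g (pvNbr c d).1 (pvNbr c d).2 ≠ pvPlant g c.1 c.2)
      ↔ pvNbr c d ∉ R.toFinset) := by
    intro d hd
    have hcl1 := hcl c hc d hd
    rw [hp, List.mem_toFinset]
    constructor
    · intro h hmem
      rcases h with h | h
      · exact h (hcl1.mpr hmem).1
      · exact h (hcl1.mpr hmem).2
    · intro h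
      by_contra hcon
      push_neg at hcon
      exact h (hcl1.mp ⟨hcon.1, hcon.2⟩)
  have b1 := bridge (1, 0) (by simp [pvDirs])
  have b2 := bridge (-1, 0) (by simp [pvDirs])
  have b3 := bridge (0, 1) (by simp [pvDirs])
  have b4 := bridge (0, -1) (by simp [pvDirs])
  simp only [pvNbr, add_zero, ← sub_eq_add_neg] at b1 b2 b3 b4
  unfold pvECell pvEF
  simp only [b1, b2, b3, b4]

theorem pvAcount_eq (g : List String) (p : Char) (R : List PCell) (hnd : R.Nodup)
    (hQ : ∀ x ∈ R, pvQ g p x)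
    (hcl : ∀ x ∈ R, ∀ d ∈ pvDirs, (pvQ g p (pvNbr x d) ↔ pvNbr x d ∈ R)) :
    pvPerimA g R - pvSharedA R = ∑ c ∈ R.toFinset, pvKF R.toFinset c := by
  rw [pvPerimA_eq, pvSharedA_eq,
    pvSum_toFinset _ _ hnd, pvSum_toFinset _ _ hnd,
    Finset.sum_congr rfl (fun c hcm => pvECell_eq g p R c (List.mem_toFinset.1 hcm) hQ hcl),
    Finset.sum_congr rfl (fun c _ => pvSCell_eq R c)]
  exact pvGeom R.toFinset

-- ---- B's local corner count equals the membership kernel on the region ----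
theorem pvIfAdd (k : Int) (C1 C2 : Bool) :
    (if C1 = true then k + 1 else if C2 = true then k + 1 else k)
      = k + (if C1 = true then 1 else if C2 = true then (1 : Int) else 0) := by
  cases C1 <;> cases C2 <;> simp

theorem pvCornerPair_eq (g : List String) (p : Char) (S : Finset PCell) (x y dx dy : Int)
    (h1 : pvSame g p (x + dx) y = true ↔ ((x + dx, y) : PCell) ∈ S)
    (h2 : pvSame g p x (y + dy) = true ↔ ((x, y + dy) : PCell) ∈ S)
    (h3 : ((x + dx, y) : PCell) ∈ S →
      (pvSame g p (x + dx) (y + dy) = true ↔ ((x + dx, y + dy) : PCell) ∈ S)) :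
    (if (!(pvSame g p (x + dx) y) && !(pvSame g p x (y + dy))) = true then (1 : Int)
     else if (pvSame g p (x + dx) y && pvSame g p x (y + dy)
         && !(pvSame g p (x + dx) (y + dy))) = true then 1 else 0)
      = pvKpairF S (x, y) dx dy := by
  unfold pvKpairF
  by_cases a : pvSame g p (x + dx) y = true
  · have ha : ((x + dx, y) : PCell) ∈ S := h1.1 a
    by_cases b : pvSame g p x (y + dy) = true
    · have hb : ((x, y + dy) : PCell) ∈ S := h2.1 b
      by_cases cdg : pvSame g p (x + dx) (y + dy) = true
      · have hc : ((x + dx, y + dy) : PCell) ∈ S := (h3 ha).1 cdg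
        simp [a, b, cdg, ha, hb, hc]
      · have hc : ((x + dx, y + dy) : PCell) ∉ S := fun hm => cdg ((h3 ha).2 hm)
        simp [a, b, cdg, ha, hb, hc]
    · have hb : ((x, y + dy) : PCell) ∉ S := fun hm => b (h2.2 hm)
      simp [a, b, ha, hb]
  · have ha : ((x + dx, y) : PCell) ∉ S := fun hm => a (h1.2 hm)
    by_cases b : pvSame g p x (y + dy) = true
    · have hb : ((x, y + dy) : PCell) ∈ S := h2.1 b
      simp [a, b, ha, hb]
    · have hb : ((x, y + dy) : PCell) ∉ S := fun hm => b (h2.2 hm)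
      simp [a, b, ha, hb]

theorem pvCorners_eq (g : List String) (p : Char) (R : List PCell) (c : PCell) (hc : c ∈ R)
    (hQ : ∀ x ∈ R, pvQ g p x)
    (hnb : ∀ a ∈ R, ∀ yy ∈ pvNbrsB a, (pvQ g p yy ↔ yy ∈ R)) :
    pvCorners g c.1 c.2 = pvKF R.toFinset c := by
  obtain ⟨x, y⟩ := c
  have hp : pvPlant g x y = p := (hQ _ hc).2
  have hsame : ∀ a b : Int, (pvSame g (pvPlant g x y) a b = pvSame g p a b) := by
    intro a b; rw [hp]
  have horth : ∀ dx dy : Int, dx = -1 ∨ dx = 1 → dy = -1 ∨ dy = 1 →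
      (pvSame g p (x + dx) y = true ↔ ((x + dx, y) : PCell) ∈ R.toFinset) ∧
      (pvSame g p x (y + dy) = true ↔ ((x, y + dy) : PCell) ∈ R.toFinset) ∧
      (((x + dx, y) : PCell) ∈ R.toFinset →
        (pvSame g p (x + dx) (y + dy) = true ↔ ((x + dx, y + dy) : PCell) ∈ R.toFinset)) := by
    intro dx dy hdx hdy
    have hmem1 : ((x + dx, y) : PCell) ∈ pvNbrsB (x, y) := by
      rcases hdx with rfl | rfl <;> simp [pvNbrsB, Prod.ext_iff] <;> omega
    have hmem2 : ((x, y + dy) : PCell) ∈ pvNbrsB (x, y) := by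
      rcases hdy with rfl | rfl <;> simp [pvNbrsB, Prod.ext_iff] <;> omega
    refine ⟨?_, ?_, ?_⟩
    · rw [pvSame_iff, List.mem_toFinset]; exact hnb _ hc _ hmem1
    · rw [pvSame_iff, List.mem_toFinset]; exact hnb _ hc _ hmem2
    · intro hin
      have hin' : ((x + dx, y) : PCell) ∈ R := List.mem_toFinset.1 hin
      have hmem3 : ((x + dx, y + dy) : PCell) ∈ pvNbrsB (x + dx, y) := by
        rcases hdy with rfl | rfl <;> simp [pvNbrsB, Prod.ext_iff] <;> omega
      rw [pvSame_iff, List.mem_toFinset]; exact hnb _ hin' _ hmem3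
  obtain ⟨a1, a2, a3⟩ := horth (-1) (-1) (Or.inl rfl) (Or.inl rfl)
  obtain ⟨b1, b2, b3⟩ := horth (-1) 1 (Or.inl rfl) (Or.inr rfl)
  obtain ⟨c1, c2, c3⟩ := horth 1 (-1) (Or.inr rfl) (Or.inl rfl)
  obtain ⟨d1, d2, d3⟩ := horth 1 1 (Or.inr rfl) (Or.inr rfl)
  show pvCorners g x y = pvKF R.toFinset (x, y)
  unfold pvCorners
  simp only [List.foldl_cons, List.foldl_nil, hp, pvIfAdd]
  rw [pvCornerPair_eq g p R.toFinset x y (-1) (-1) a1 a2 a3,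
      pvCornerPair_eq g p R.toFinset x y (-1) 1 b1 b2 b3,
      pvCornerPair_eq g p R.toFinset x y 1 (-1) c1 c2 c3,
      pvCornerPair_eq g p R.toFinset x y 1 1 d1 d2 d3]
  unfold pvKF
  ring

theorem pvBsum_eq (g : List String) (p : Char) (R : List PCell) (hnd : R.Nodup)
    (hQ : ∀ x ∈ R, pvQ g p x)
    (hnb : ∀ a ∈ R, ∀ yy ∈ pvNbrsB a, (pvQ g p yy ↔ yy ∈ R)) :
    R.foldl (fun s c => s + pvCorners g c.1 c.2) 0 = ∑ c ∈ R.toFinset, pvKF R.toFinset c := by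
  rw [pvFoldl_add (fun c : PCell => pvCorners g c.1 c.2) R 0, zero_add,
    List.map_congr_left (fun c hc => pvCorners_eq g p R c hc hQ hnb),
    pvSum_toFinset _ _ hnd]

-- ---- outer double loop: relational fold ----
theorem pvFoldl_rel {α σ τ : Type} (Rel : σ → τ → Prop) (f : σ → α → σ) (h : τ → α → τ) :
    ∀ (l : List α), (∀ a ∈ l, ∀ s t, Rel s t → Rel (f s a) (h t a)) →
      ∀ s t, Rel s t → Rel (l.foldl f s) (l.foldl h t) := by
  intro l
  induction l with
  | nil => intro _ s t hst; exact hst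
  | cons a l ih =>
    intro hstep s t hst
    exact ih (fun b hb => hstep b (by simp [hb])) _ _ (hstep a (by simp) s t hst)

def pvRel (g : List String) (a b : PySem.Set PCell × Int) : Prop :=
  a.2 = b.2 ∧ (∀ x, x ∈ a.1 ↔ x ∈ b.1) ∧ pvOutInv g a.1

theorem pvCell_step (g : List String) (i j : Int)
    (h0i : 0 ≤ i) (hih : i < pvH g) (h0j : 0 ≤ j) (hjw : j < pvW g)
    (stA stB : PySem.Set PCell × Int) (hrel : pvRel g stA stB) :
    pvRel g
      (if ((i, j) : PCell) ∈ stA.1 then stA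
       else
         let visited := PySem.Set.add stA.1 (i, j)
         let pr := pvDfsA g (pvPlant g i j) (pvMu g visited [(i, j)]) visited [(i, j)] []
         let area : Int := PySem.List.len pr.1
         (pr.2, stA.2 + area * (pvPerimA g pr.1 - pvSharedA pr.1)))
      (if ((i, j) : PCell) ∈ stB.1 then stB
       else
         let region := pvFlood g (pvPlant g i j)
           (pvMu g (PySem.Set.add PySem.Set.empty ((i, j) : PCell)) [((i, j) : PCell)])
           (PySem.Set.add PySem.Set.empty ((i, j) : PCell)) [((i, j) : PCell)]
         (PySem.Set.union stB.1 region,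
          stB.2 + PySem.Set.len region
             * (region.foldl (fun s c => s + pvCorners g c.1 c.2) 0))) := by
  obtain ⟨hval, hmem, hinv⟩ := hrel
  by_cases hij : ((i, j) : PCell) ∈ stA.1
  · rw [if_pos hij, if_pos ((hmem _).1 hij)]
    exact ⟨hval, hmem, hinv⟩
  · have hijB : ((i, j) : PCell) ∉ stB.1 := fun h => hij ((hmem _).2 h)
    rw [if_neg hij, if_neg hijB]
    have hvalid : pvValid g i j = true := by
      simp only [pvValid, Bool.and_eq_true, decide_eq_true_eq]
      exact ⟨⟨h0i, hih⟩, ⟨h0j, hjw⟩⟩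
    have hQs : pvQ g (pvPlant g i j) ((i, j) : PCell) := ⟨hvalid, rfl⟩
    obtain ⟨A1, A2, A3, A4⟩ := pvRegionA_char g (pvPlant g i j) stA.1 ((i, j) : PCell)
      hij hQs rfl hinv
    obtain ⟨B1, B2⟩ := pvFloodB_char g (pvPlant g i j) ((i, j) : PCell) hQs
    set p := pvPlant g i j
    set RA := (pvDfsA g p (pvMu g (PySem.Set.add stA.1 ((i, j) : PCell)) [((i, j) : PCell)])
      (PySem.Set.add stA.1 ((i, j) : PCell)) [((i, j) : PCell)] []).1 with hRA
    set RB := pvFlood g p (pvMu g (PySem.Set.add PySem.Set.empty ((i, j) : PCell)) [((i, j) : PCell)])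
      (PySem.Set.add PySem.Set.empty ((i, j) : PCell)) [((i, j) : PCell)] with hRB
    have hsame : ∀ x, x ∈ RA ↔ x ∈ RB := by
      intro x; rw [A2 x, B2 x]
    have hperm : RA.Perm RB := (List.perm_ext_iff_of_nodup A1 B1).2 hsame
    have hfin : RA.toFinset = RB.toFinset := by
      ext x; simp only [List.mem_toFinset]; exact hsame x
    have hQA : ∀ x ∈ RA, pvQ g p x := fun x hx => ((A2 x).1 hx).1
    have hclA : ∀ x ∈ RA, ∀ d ∈ pvDirs, (pvQ g p (pvNbr x d) ↔ pvNbr x d ∈ RA) := by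
      intro x hx d hd
      constructor
      · intro hq
        exact (A2 _).2 ⟨hq, pvReach.step x d ((A2 x).1 hx).2 hd hq⟩
      · intro hm
        exact ((A2 _).1 hm).1
    have hQB : ∀ x ∈ RB, pvQ g p x := fun x hx => ((B2 x).1 hx).1
    have hnbB : ∀ a ∈ RB, ∀ yy ∈ pvNbrsB a, (pvQ g p yy ↔ yy ∈ RB) := by
      intro a ha yy hyy
      obtain ⟨d, hd, rfl⟩ := mem_pvNbrsB.1 hyy
      constructor
      · intro hq
        exact (B2 _).2 ⟨hq, pvReach.step a d ((B2 a).1 ha).2 hd hq⟩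
      · intro hm
        exact ((B2 _).1 hm).1
    have hcount : pvPerimA g RA - pvSharedA RA
        = RB.foldl (fun s c => s + pvCorners g c.1 c.2) 0 := by
      rw [pvAcount_eq g p RA A1 hQA hclA, pvBsum_eq g p RB B1 hQB hnbB, hfin]
    have hlen : PySem.List.len RA = PySem.Set.len RB := by
      show ((RA.length : Int)) = ((RB.length : Int))
      rw [hperm.length_eq]
    refine ⟨?_, ?_, A4⟩
    · show stA.2 + PySem.List.len RA * (pvPerimA g RA - pvSharedA RA)
        = stB.2 + PySem.Set.len RB * (RB.foldl (fun s c => s + pvCorners g c.1 c.2) 0)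
      rw [hval, hcount, hlen]
    · intro x
      show x ∈ _ ↔ x ∈ PySem.Set.union stB.1 RB
      rw [A3 x, PySem.Set.mem_union]
      constructor
      · rintro (hx | hx)
        · exact Or.inl ((hmem x).1 hx)
        · exact Or.inr ((hsame x).1 hx)
      · rintro (hx | hx)
        · exact Or.inl ((hmem x).2 hx)
        · exact Or.inr ((hsame x).2 hx)

theorem pvOutInv_empty (g : List String) : pvOutInv g (PySem.Set.empty : PySem.Set PCell) := by
  constructor <;> (intro x hx; simp [PySem.Set.empty] at hx)

theorem pvSolve_eq (g : List String) : solve g = solve_alt g := by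
  unfold solve solve_alt
  refine (pvFoldl_rel (pvRel g) _ _
    (PySem.List.pyRange 0 (pvH g) 1) ?_
    ((PySem.Set.empty : PySem.Set PCell), (0 : Int))
    ((PySem.Set.empty : PySem.Set PCell), (0 : Int))
    ⟨rfl, fun _ => Iff.rfl, pvOutInv_empty g⟩).1
  intro i hi stA stB hrel
  have hib := (PySem.List.mem_pyRange_one).1 hi
  refine pvFoldl_rel (pvRel g) _ _ (PySem.List.pyRange 0 (pvW g) 1) ?_ stA stB hrel
  intro j hj stA2 stB2 hrel2
  have hjb := (PySem.List.mem_pyRange_one).1 hj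
  exact pvCell_step g i j hib.1 hib.2 hjb.1 hjb.2 stA2 stB2 hrel2

-- ===== VERDICT (by name: the statement is the Claim_ definition above) =====
theorem solve_spec : Claim_equal_solve := by
  intro garden _ _
  unfold Spec_solve
  exact pvSolve_eq garden
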